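-- pv_equiv track=rewrite | github.com/liupengsay/PyIsTheBestLang | src/mathmatics/number_theory.py | lc_2464
-- ===== SOURCE A (Python) =====
-- from math import inf
-- from typing import List
--
-- class NumberTheoryPrimeFactor:
--     def __init__(self, ceil):
--         self.ceil = ceil
--         self.prime_factor = [[] for _ in range(self.ceil + 1)]
--         self.min_prime = [0] * (self.ceil + 1)
--         self.get_min_prime_and_prime_factor()
--         return
--
--     def get_min_prime_and_prime_factor(self):
--         # 模板：计算 1 到 self.ceil 所有数字的最小质数因子
--         for i in range(2, self.ceil + 1):
--             if not self.min_prime[i]: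
--                 self.min_prime[i] = i
--                 for j in range(i * i, self.ceil + 1, i):
--                     if not self.min_prime[j]:
--                         self.min_prime[j] = i
--
--         # 模板：计算 1 到 self.ceil 所有数字的质数分解（可选）
--         for num in range(2, self.ceil + 1):
--             i = num
--             while num > 1:
--                 p = self.min_prime[num]
--                 cnt = 0
--                 while num % p == 0:
--                     num //= p
--                     cnt += 1
--                 self.prime_factor[i].append([p, cnt])
--         return
--
-- def lc_2464(nums: List[int]) -> int:
--     # 模板：计算 1 到 n 的数所有的质因子并使用动态规划计数
--     nt = NumberTheoryPrimeFactor(max(nums))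
--     ind = dict()
--     n = len(nums)
--     dp = [inf] * (n + 1)
--     dp[0] = 0
--     for i, num in enumerate(nums):
--         while num > 1:
--             p = nt.min_prime[num]
--             while num % p == 0:
--                 num //= p
--             if p not in ind or dp[i] < dp[ind[p]]:
--                 ind[p] = i
--             if dp[ind[p]] + 1 < dp[i + 1]:
--                 dp[i + 1] = dp[ind[p]] + 1
--             if dp[i] + 1 < dp[i + 1]:
--                 dp[i + 1] = dp[i] + 1
--     return dp[-1] if dp[-1] < inf else -1
-- ===== SOURCE B (Python) =====
-- def _omin(a, b):
--     # minimum of two "int or None" values, None meaning +infinity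
--     if a is None:
--         return b
--     if b is None:
--         return a
--     return a if a < b else b
--
--
-- def _distinct_prime_factors(num):
--     # distinct prime factors of num in increasing order, by trial division
--     ps = []
--     p = 2
--     while p * p <= num:
--         if num % p == 0:
--             ps.append(p)
--             while num % p == 0:
--                 num //= p
--         p += 1
--     if num > 1:
--         ps.append(num)
--     return ps
--
--
-- def lc_2464(nums):
--     # best[p] = smallest dp value among processed positions whose number has prime factor p
--     # prev    = dp value of the prefix processed so far (None = unreachable)
--     best = {}
--     prev = 0
--     for num in nums:
--         cur = None
--         for p in _distinct_prime_factors(num):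
--             b = _omin(best.get(p), prev)
--             best[p] = b
--             cur = _omin(cur, None if b is None else b + 1)
--         prev = cur
--     return -1 if prev is None else prev
-- ===== Notes on version B (the rewrite author's own statement) =====
-- stated objective: alternative
-- what changed: B drops A's full sieve up to max(nums) and its index-into-dp bookkeeping: it factorizes each element by trial division to sqrt(num) and keeps, per prime, the minimum dp value directly (plus only the previous dp value instead of the whole dp array).
import Mathlib
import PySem

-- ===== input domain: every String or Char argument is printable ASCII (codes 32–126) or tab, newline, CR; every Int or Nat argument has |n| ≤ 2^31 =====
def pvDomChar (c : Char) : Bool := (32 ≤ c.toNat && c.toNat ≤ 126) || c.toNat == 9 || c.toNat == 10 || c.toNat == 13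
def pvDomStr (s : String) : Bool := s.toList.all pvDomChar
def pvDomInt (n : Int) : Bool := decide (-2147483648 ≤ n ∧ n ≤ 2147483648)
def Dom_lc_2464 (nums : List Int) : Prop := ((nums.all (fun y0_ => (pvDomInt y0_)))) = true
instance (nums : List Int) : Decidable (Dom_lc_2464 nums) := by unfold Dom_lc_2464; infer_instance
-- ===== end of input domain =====

-- B drops A's full sieve (and A's index-into-dp bookkeeping) for per-element trial division with
-- per-prime minimum dp values; the RETURN value is proved equal on all non-empty inputs.

-- shared helper: `while num % p == 0: num //= p` — the inner division loop both Pythons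
-- contain verbatim.  fuel is a totality artifact only; callers pass fuel > #iterations.
def pvDivOut : Nat → Int → Int → Int
  | 0, num, _ => num
  | fuel + 1, num, p =>
    if PySem.Int.mod num p = 0 then pvDivOut fuel (PySem.Int.floordiv num p) p else num

-- Python's `<` on dp values, which are int or math.inf; `none` models inf exactly
-- (the dp cells never hold any float other than inf).
def pvOptLt : Option Int → Option Int → Bool
  | some a, some b => a < b
  | some _, none => true
  | none, _ => false

-- `x + 1` on int-or-inf (inf + 1 == inf)
def pvAdd1 : Option Int → Option Int := Option.map (· + 1)

-- ===== PORT A =====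
-- inner sieve loop: `for j in range(i*i, ceil+1, i): if not min_prime[j]: min_prime[j] = i`
def pvSieveInner (c i : Int) (mp : List Int) : List Int :=
  (PySem.List.pyRange (i * i) (c + 1) i).foldl
    (fun mp j => if PySem.List.pyGetD mp j 0 = 0 then PySem.List.pySetD mp j i else mp) mp

-- `min_prime` of NumberTheoryPrimeFactor(c).  (The `prime_factor` table A's __init__ also fills
-- is never read by lc_2464 and cannot affect the result, so it is not materialised here.)
def pvMinPrime (c : Int) : List Int :=
  (PySem.List.pyRange 2 (c + 1) 1).foldl
    (fun mp i =>
      if PySem.List.pyGetD mp i 0 = 0 then pvSieveInner c i (PySem.List.pySetD mp i i) else mp)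
    (List.replicate (c + 1).toNat 0)

-- body of A's `while num > 1` loop for one prime p (state: the dict `ind` and the dp list);
-- Python short-circuits `p not in ind or dp[i] < dp[ind[p]]`, so reading dp[ind.getD p 0]
-- eagerly here is harmless (ind.getD p 0 = 0 is only reached when the first disjunct is true)
def pvAStep (i p : Int) (st : PySem.Dict Int Int × List (Option Int)) :
    PySem.Dict Int Int × List (Option Int) :=
  let ind := st.1
  let dp := st.2
  let ind' :=
    if ind.contains p = false ∨
        pvOptLt (PySem.List.pyGetD dp i none) (PySem.List.pyGetD dp (ind.getD p 0) none) then
      ind.insert p i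
    else ind
  let dp' :=
    if pvOptLt (pvAdd1 (PySem.List.pyGetD dp (ind'.getD p 0) none))
        (PySem.List.pyGetD dp (i + 1) none) then
      PySem.List.pySetD dp (i + 1) (pvAdd1 (PySem.List.pyGetD dp (ind'.getD p 0) none))
    else dp
  let dp'' :=
    if pvOptLt (pvAdd1 (PySem.List.pyGetD dp' i none)) (PySem.List.pyGetD dp' (i + 1) none) then
      PySem.List.pySetD dp' (i + 1) (pvAdd1 (PySem.List.pyGetD dp' i none))
    else dp'
  (ind', dp'')

-- A's `while num > 1` loop: p = min_prime[num]; divide p out of num; update ind/dp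
def pvALoop (fuel : Nat) (mp : List Int) (i : Int) (num : Int)
    (st : PySem.Dict Int Int × List (Option Int)) : PySem.Dict Int Int × List (Option Int) :=
  match fuel with
  | 0 => st
  | fuel + 1 =>
    if 1 < num then
      pvALoop fuel mp i (pvDivOut (num.toNat + 1) num (PySem.List.pyGetD mp num 0))
        (pvAStep i (PySem.List.pyGetD mp num 0) st)
    else st

def lc_2464 (nums : List Int) : Int :=
  -- max(nums); the ValueError on [] is excluded by Pre_lc_2464
  let c := (PySem.List.max? nums (fun x => x)).getD 0
  let mp := pvMinPrime c
  let n := nums.length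
  let dp0 : List (Option Int) :=
    PySem.List.pySetD (List.replicate (n + 1) (none : Option Int)) 0 (some 0)
  let res :=
    (PySem.List.enumerate nums 0).foldl
      (fun st pair => pvALoop (pair.2.toNat + 1) mp pair.1 pair.2 st)
      ((PySem.Dict.empty : PySem.Dict Int Int), dp0)
  match PySem.List.pyGetD res.2 (-1) none with
  | some v => v
  | none => -1

-- ===== PORT B =====
-- _omin: minimum of two int-or-None values, None = +infinity
def pvOMin : Option Int → Option Int → Option Int
  | none, b => b
  | some a, none => some a
  | some a, some b => if a < b then some a else some b

-- _distinct_prime_factors: trial division up to sqrt(num) (fuel is a totality artifact)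
def pvTrialLoop : Nat → Int → Int → List Int → List Int
  | 0, _, _, ps => ps
  | fuel + 1, p, num, ps =>
    if p * p ≤ num then
      if PySem.Int.mod num p = 0 then
        pvTrialLoop fuel (p + 1) (pvDivOut (num.toNat + 1) num p) (ps ++ [p])
      else pvTrialLoop fuel (p + 1) num ps
    else if 1 < num then ps ++ [num] else ps

def pvDistinctPrimeFactors (num : Int) : List Int := pvTrialLoop (num.toNat + 2) 2 num []

-- body of B's `for p in _distinct_prime_factors(num)` loop (state: cur and the dict best)
def pvBStep (prev : Option Int) (st : Option Int × PySem.Dict Int (Option Int)) (p : Int) :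
    Option Int × PySem.Dict Int (Option Int) :=
  let b := pvOMin (st.2.getD p none) prev
  (pvOMin st.1 (pvAdd1 b), st.2.insert p b)

def lc_2464_alt (nums : List Int) : Int :=
  let res :=
    nums.foldl
      (fun (st : Option Int × PySem.Dict Int (Option Int)) num =>
        (pvDistinctPrimeFactors num).foldl (pvBStep st.1) (none, st.2))
      (some 0, (PySem.Dict.empty : PySem.Dict Int (Option Int)))
  match res.1 with
  | some v => v
  | none => -1

-- ===== PRECONDITION & SPEC =====
-- Pre_ excludes only the empty list, on which Python A raises ValueError (max of empty sequence).
def Pre_lc_2464 (nums : List Int) : Prop := nums ≠ []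
instance (nums : List Int) : Decidable (Pre_lc_2464 nums) := by unfold Pre_lc_2464; infer_instance
def pvWitness_lc_2464 : List Int := [2, 6, 3, 4, 3]

def Spec_lc_2464 (nums : List Int) (out : Int) : Prop := out = lc_2464_alt nums
instance (nums : List Int) (out : Int) : Decidable (Spec_lc_2464 nums out) := by
  unfold Spec_lc_2464; infer_instance

-- ===== CLAIM (what is proved, stated in full; the proofs are below) =====
def Claim_equal_lc_2464 : Prop :=
  ∀ (nums : List Int), Dom_lc_2464 nums → Pre_lc_2464 nums → Spec_lc_2464 nums (lc_2464 nums)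

-- ===== LEMMAS AND PROOFS =====

-- ## option-value lemmas
theorem pvOMin_eq_ite (a b : Option Int) : pvOMin a b = if pvOptLt b a then b else a := by
  cases a with
  | none => cases b <;> simp [pvOMin, pvOptLt]
  | some x =>
    cases b with
    | none => simp [pvOMin, pvOptLt]
    | some y =>
      simp only [pvOMin, pvOptLt]
      by_cases h1 : x < y <;> by_cases h2 : y < x <;> simp [h1, h2] <;> omega

theorem pvNoop3 (cur bp prev : Option Int) :
    pvOptLt (pvAdd1 prev) (pvOMin cur (pvAdd1 (pvOMin bp prev))) = false := by
  cases cur <;> cases bp <;> cases prev <;>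
    simp [pvOMin, pvAdd1, pvOptLt] <;>
    (repeat' first
      | omega
      | rfl
      | (split_ifs <;> simp [pvOptLt]))

-- ## getD through set
theorem pvGetD_set {α : Type} (xs : List α) (m k : Nat) (v d : α) :
    (xs.set m v).getD k d = if k = m ∧ m < xs.length then v else xs.getD k d := by
  rcases Decidable.em (k = m) with rfl | hne
  · by_cases h2 : k < xs.length
    · simp [List.getD, List.getElem?_set, h2]
    · have hn : (xs.set k v).length ≤ k := by simpa using Nat.le_of_not_lt h2
      simp [List.getD, h2, List.getElem?_eq_none hn, List.getElem?_eq_none (Nat.le_of_not_lt h2)]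
  · simp [List.getD, List.getElem?_set, Ne.symm hne, hne]

-- ## strip: divide p out of n completely
def pvStrip (n p : Nat) : Nat :=
  if h : 2 ≤ p ∧ 0 < n ∧ p ∣ n then pvStrip (n / p) p else n
  termination_by n
  decreasing_by exact Nat.div_lt_self h.2.1 (by omega)

theorem pvStrip_le (n p : Nat) : pvStrip n p ≤ n := by
  fun_induction pvStrip n p with
  | case1 n h ih => exact le_trans ih (Nat.div_le_self _ _)
  | case2 n h => exact le_rfl


theorem pvStrip_dvd (n p : Nat) : pvStrip n p ∣ n := by
  fun_induction pvStrip n p with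
  | case1 n h ih => exact ih.trans (Nat.div_dvd_of_dvd h.2.2)
  | case2 n h => exact dvd_rfl

theorem pvStrip_not_dvd (n p : Nat) (hp : 2 ≤ p) (hn : 0 < n) : ¬ p ∣ pvStrip n p := by
  fun_induction pvStrip n p with
  | case1 n h ih =>
      exact ih (Nat.div_pos (Nat.le_of_dvd h.2.1 h.2.2) (by omega))
  | case2 n h =>
      intro hd
      exact h ⟨hp, hn, hd⟩

theorem pvStrip_lt (n p : Nat) (hp : 2 ≤ p) (hn : 0 < n) (hd : p ∣ n) : pvStrip n p < n := by
  rw [pvStrip, dif_pos ⟨hp, hn, hd⟩]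
  exact lt_of_le_of_lt (pvStrip_le _ _) (Nat.div_lt_self hn (by omega))


-- ## the canonical list of distinct prime factors, smallest first
def pvPrimesN (n : Nat) : List Nat :=
  if h : 2 ≤ n then n.minFac :: pvPrimesN (pvStrip n n.minFac) else []
  termination_by n
  decreasing_by
    exact lt_of_lt_of_le
      (pvStrip_lt n n.minFac ((Nat.minFac_prime (show n ≠ 1 by omega)).two_le) (by omega) (Nat.minFac_dvd n))
      le_rfl

def pvPrimesI (num : Int) : List Int := (pvPrimesN num.toNat).map (fun q => Int.ofNat q)

theorem pvPrimesN_of_lt (n : Nat) (h : n < 2) : pvPrimesN n = [] := by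
  rw [pvPrimesN, dif_neg (by omega)]

theorem pvPrimesN_of_ge (n : Nat) (h : 2 ≤ n) :
    pvPrimesN n = n.minFac :: pvPrimesN (pvStrip n n.minFac) := by
  rw [pvPrimesN, dif_pos h]

theorem pvPrimesI_of_le_one (num : Int) (h : num ≤ 1) : pvPrimesI num = [] := by
  unfold pvPrimesI
  rw [pvPrimesN_of_lt _ (by omega)]
  rfl

-- ## pvDivOut computes pvStrip
theorem pvDivOut_eq (fuel : Nat) (num p : Int) (hp : 2 ≤ p) (hn : 0 < num)
    (hf : num.toNat ≤ fuel) :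
    pvDivOut fuel num p = ((pvStrip num.toNat p.toNat : Nat) : Int) := by
  induction fuel generalizing num with
  | zero => omega
  | succ fuel ih =>
    have hp' : (0:Int) < p := by omega
    have hcast : ((num.toNat : Int)) = num := by omega
    have hpcast : ((p.toNat : Int)) = p := by omega
    rw [pvDivOut, PySem.Int.mod_eq_emod_of_pos hp']
    by_cases hd : num % p = 0
    · have hdvd : p ∣ num := Int.dvd_of_emod_eq_zero hd
      have hdvdN : p.toNat ∣ num.toNat := by
        have h' := hdvd
        rw [← hcast, ← hpcast] at h'
        exact_mod_cast h'
      have hple : p ≤ num := Int.le_of_dvd hn hdvd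
      have hq : PySem.Int.floordiv num p = ((num.toNat / p.toNat : Nat) : Int) := by
        rw [PySem.Int.floordiv_eq_ediv_of_pos hp']
        rw [← hcast, ← hpcast]
        exact_mod_cast (Int.natCast_div num.toNat p.toNat).symm
      have hqpos : 0 < num.toNat / p.toNat := Nat.div_pos (by omega) (by omega)
      rw [if_pos hd, hq, ih _ (by exact_mod_cast hqpos) ?hfl]
      case hfl =>
        simp only [Int.toNat_natCast]
        have : num.toNat / p.toNat < num.toNat := Nat.div_lt_self (by omega) (by omega)
        omega
      congr 1
      simp only [Int.toNat_natCast]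
      conv_rhs => rw [pvStrip, dif_pos ⟨show 2 ≤ p.toNat by omega, show 0 < num.toNat by omega, hdvdN⟩]
    · rw [if_neg hd]
      have hnd : ¬ p.toNat ∣ num.toNat := by
        intro hk
        apply hd
        apply Int.emod_eq_zero_of_dvd
        rw [← hcast, ← hpcast]
        exact_mod_cast hk
      rw [pvStrip, dif_neg (by tauto)]
      omega

theorem pvTrialLoop_eq (fuel : Nat) (p num : Int) (ps : List Int) (hp : 2 ≤ p)
    (hnd : ∀ q : Int, 2 ≤ q → q < p → ¬ q ∣ num)
    (hf : num.toNat + 3 ≤ fuel + p.toNat) :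
    pvTrialLoop fuel p num ps = ps ++ pvPrimesI num := by
  induction fuel generalizing p num ps with
  | zero =>
    have hnum : num ≤ 1 := by
      by_contra hgt
      push_neg at hgt
      exact hnd num (by omega) (by omega) dvd_rfl
    rw [pvTrialLoop, pvPrimesI_of_le_one num hnum, List.append_nil]
  | succ fuel ih =>
    rw [pvTrialLoop]
    by_cases hle : p * p ≤ num
    · have hnum4 : 4 ≤ num := le_trans (by nlinarith) hle
      have hplenum : p ≤ num := le_trans (by nlinarith) hle
      rw [if_pos hle, PySem.Int.mod_eq_emod_of_pos (by omega)]
      have hcast : ((num.toNat : Int)) = num := by omega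
      have hpcast : ((p.toNat : Int)) = p := by omega
      by_cases hd : num % p = 0
      · have hdvd : p ∣ num := Int.dvd_of_emod_eq_zero hd
        have hdvdN : p.toNat ∣ num.toNat := by
          have h' := hdvd; rw [← hcast, ← hpcast] at h'; exact_mod_cast h'
        -- p is the least prime factor of num
        have hmfle : num.toNat.minFac ≤ p.toNat := Nat.minFac_le_of_dvd (by omega) hdvdN
        have hmfge : p.toNat ≤ num.toNat.minFac := by
          by_contra hlt
          push_neg at hlt
          have hmfd : (num.toNat.minFac : Int) ∣ num := by
            rw [← hcast]; exact_mod_cast Nat.minFac_dvd num.toNat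
          have hmf2 : 2 ≤ num.toNat.minFac :=
            (Nat.minFac_prime (show num.toNat ≠ 1 by omega)).two_le
          exact hnd _ (by omega) (by omega) hmfd
        have hmf : num.toNat.minFac = p.toNat := by omega
        rw [if_pos hd, pvDivOut_eq _ _ _ hp (by omega) (by omega)]
        set num' : Int := ((pvStrip num.toNat p.toNat : Nat) : Int) with hnum'
        have hstriplt : pvStrip num.toNat p.toNat < num.toNat :=
          pvStrip_lt _ _ (by omega) (by omega) hdvdN
        rw [ih (p + 1) num' (ps ++ [p]) (by omega) ?nd ?fl]
        case nd =>
          intro q hq2 hqlt hqd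
          have hq'cast : ((q.toNat : Int)) = q := by omega
          have hqdN : q.toNat ∣ pvStrip num.toNat p.toNat := by
            have h' := hqd; rw [← hq'cast, hnum'] at h'; exact_mod_cast h'
          by_cases hqp : q = p
          · subst hqp
            exact pvStrip_not_dvd _ _ (by omega) (by omega) hqdN
          · have : q ∣ num := by
              rw [← hcast, ← hq'cast]
              exact_mod_cast hqdN.trans (pvStrip_dvd _ _)
            exact hnd q hq2 (by omega) this
        case fl =>
          simp only [hnum', Int.toNat_natCast]
          omega
        -- now align the produced lists
        have hunfold := pvPrimesN_of_ge num.toNat (by omega)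
        rw [hmf] at hunfold
        simp only [pvPrimesI, hunfold, List.map_cons, hpcast, hnum', Int.toNat_natCast,
          List.append_assoc, List.cons_append, List.nil_append]
        simp
        omega
      · rw [if_neg hd]
        have hndq : ¬ p ∣ num := fun h => hd (Int.emod_eq_zero_of_dvd h)
        exact ih (p + 1) num ps (by omega)
          (fun q hq2 hqlt hqd => by
            by_cases hqp : q = p
            · exact hndq (hqp ▸ hqd)
            · exact hnd q hq2 (by omega) hqd)
          (by omega)
    · rw [if_neg hle]
      by_cases hgt : 1 < num
      · rw [if_pos hgt]
        have hcast : ((num.toNat : Int)) = num := by omega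
        -- num is prime here: its least factor is itself
        have hprime : num.toNat.Prime := by
          by_contra hnp
          have hsq := Nat.minFac_sq_le_self (show 0 < num.toNat by omega) hnp
          have hmf2 : 2 ≤ num.toNat.minFac :=
            (Nat.minFac_prime (show num.toNat ≠ 1 by omega)).two_le
          have hmfd : (num.toNat.minFac : Int) ∣ num := by
            rw [← hcast]; exact_mod_cast Nat.minFac_dvd num.toNat
          have hmfgep : p ≤ (num.toNat.minFac : Int) := by
            by_contra hlt
            push_neg at hlt
            exact hnd _ (by omega) hlt hmfd
          have : p * p ≤ (num.toNat.minFac : Int) * (num.toNat.minFac : Int) := by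
            nlinarith
          have hsq' : ((num.toNat.minFac * num.toNat.minFac : Nat) : Int) ≤ num := by
            rw [← hcast]
            exact_mod_cast (by nlinarith [hsq] : num.toNat.minFac * num.toNat.minFac ≤ num.toNat)
          push_cast at hsq'
          omega
        have hmfself : num.toNat.minFac = num.toNat := hprime.minFac_eq
        have hstrip1 : pvStrip num.toNat num.toNat = 1 := by
          have h1 : pvStrip num.toNat num.toNat = pvStrip (num.toNat / num.toNat) num.toNat := by
            rw [pvStrip, dif_pos ⟨by omega, by omega, dvd_rfl⟩]
          rw [h1, Nat.div_self (by omega), pvStrip, dif_neg (fun h => by have := Nat.le_of_dvd one_pos h.2.2; omega)]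
        simp only [pvPrimesI, pvPrimesN_of_ge num.toNat (by omega), hmfself, hstrip1,
          pvPrimesN_of_lt 1 (by omega), List.map_cons, List.map_nil, hcast]
        simp [hcast]
      · rw [if_neg hgt, pvPrimesI_of_le_one num (by omega), List.append_nil]

theorem pvDPF_eq (num : Int) : pvDistinctPrimeFactors num = pvPrimesI num := by
  have := pvTrialLoop_eq (num.toNat + 2) 2 num [] (by omega)
    (fun q hq2 hqlt _ => by omega) (by omega)
  simpa [pvDistinctPrimeFactors] using this

-- marking fold: length is preserved
theorem pvFoldMark_len (i : Int) (l : List Int) (mp : List Int) :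
    (l.foldl
      (fun mp j => if PySem.List.pyGetD mp j 0 = 0 then PySem.List.pySetD mp j i else mp)
      mp).length = mp.length := by
  induction l generalizing mp with
  | nil => rfl
  | cons j t ih =>
    simp only [List.foldl_cons]
    rw [ih]
    split_ifs <;> simp [PySem.List.length_pySetD]

-- marking fold, pointwise: an entry is overwritten with i iff its index is listed and it was 0
theorem pvFoldMark_getD (i : Int) (hi : i ≠ 0) (l : List Int) (hl : l.Nodup) :
    ∀ (mp : List Int), (∀ j ∈ l, 0 ≤ j ∧ j < (mp.length : Int)) → ∀ (k : Int), 0 ≤ k →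
      PySem.List.pyGetD
        (l.foldl
          (fun mp j => if PySem.List.pyGetD mp j 0 = 0 then PySem.List.pySetD mp j i else mp)
          mp) k 0 =
      if k ∈ l ∧ PySem.List.pyGetD mp k 0 = 0 then i else PySem.List.pyGetD mp k 0 := by
  induction l with
  | nil => intro mp _ k _; simp
  | cons j t ih =>
    intro mp hb k hk
    have hj0 : 0 ≤ j := (hb j (by simp)).1
    have hjlen : j < (mp.length : Int) := (hb j (by simp)).2
    have hnd := hl
    rw [List.nodup_cons] at hnd
    simp only [List.foldl_cons]
    set mp' := if PySem.List.pyGetD mp j 0 = 0 then PySem.List.pySetD mp j i else mp with hmp'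
    have hlen' : mp'.length = mp.length := by
      rw [hmp']; split_ifs <;> simp [PySem.List.length_pySetD]
    have hb' : ∀ x ∈ t, 0 ≤ x ∧ x < (mp'.length : Int) := by
      intro x hx; rw [hlen']; exact hb x (by simp [hx])
    rw [ih hnd.2 mp' hb' k hk]
    have hget' : ∀ m : Int, 0 ≤ m → m ≠ j →
        PySem.List.pyGetD mp' m 0 = PySem.List.pyGetD mp m 0 := by
      intro m hm hne
      rw [hmp']
      split_ifs with h0
      · rw [PySem.List.pySetD_of_nonneg mp i hj0, PySem.List.pyGetD_of_nonneg _ _ hm,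
          PySem.List.pyGetD_of_nonneg _ _ hm, pvGetD_set]
        rw [if_neg (by intro ⟨hh, _⟩; exact hne (by omega))]
      · rfl
    by_cases hkj : k = j
    · subst hkj
      have hknt : k ∉ t := hnd.1
      rw [if_neg (by simp [hknt])]
      by_cases h0 : PySem.List.pyGetD mp k 0 = 0
      · rw [if_pos ⟨by simp, h0⟩, hmp', if_pos h0,
          PySem.List.pySetD_of_nonneg mp i hj0, PySem.List.pyGetD_of_nonneg _ _ hk, pvGetD_set,
          if_pos ⟨rfl, by omega⟩]
      · rw [if_neg (by simp [h0]), hmp', if_neg h0]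
    · rw [hget' k hk hkj]
      by_cases hkt : k ∈ t ∧ PySem.List.pyGetD mp k 0 = 0
      · rw [if_pos hkt, if_pos ⟨by simp [hkt.1], hkt.2⟩]
      · rw [if_neg hkt, if_neg (by
          intro ⟨hm, h0⟩
          rcases List.mem_cons.mp hm with rfl | hm'
          · exact hkj rfl
          · exact hkt ⟨hm', h0⟩)]

theorem pvSieveInner_len (c i : Int) (mp : List Int) :
    (pvSieveInner c i mp).length = mp.length := pvFoldMark_len _ _ _

theorem pvSieveInner_getD (c i : Int) (h2 : 2 ≤ i) (mp : List Int)
    (hlen : (mp.length : Int) = c + 1) (k : Int) (hk0 : 0 ≤ k) (hkc : k ≤ c) :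
    PySem.List.pyGetD (pvSieveInner c i mp) k 0 =
      if i * i ≤ k ∧ i ∣ k ∧ PySem.List.pyGetD mp k 0 = 0 then i
      else PySem.List.pyGetD mp k 0 := by
  have hnodup : (PySem.List.pyRange (i * i) (c + 1) i).Nodup := by
    rw [PySem.List.pyRange_of_pos _ _ (by omega)]
    refine (List.nodup_range).map ?_
    intro a b hab
    have h1 := add_left_cancel hab
    have h2 := mul_left_cancel₀ (by omega : (i:Int) ≠ 0) h1
    exact_mod_cast h2
  have hmem : ∀ x : Int, x ∈ PySem.List.pyRange (i * i) (c + 1) i ↔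
      i * i ≤ x ∧ x < c + 1 ∧ i ∣ x - i * i :=
    fun x => PySem.List.mem_pyRange_iff_of_pos (by omega) x
  have hdvd_iff : ∀ x : Int, (i ∣ x - i * i) ↔ i ∣ x := by
    intro x
    constructor
    · intro h
      have := dvd_add h (dvd_mul_right i i)
      simpa using this
    · intro h
      exact dvd_sub h (dvd_mul_right i i)
  unfold pvSieveInner
  rw [pvFoldMark_getD i (by omega) _ hnodup mp
    (fun j hj => by
      rw [hmem] at hj
      constructor
      · nlinarith [hj.1]
      · omega) k hk0]
  by_cases hc : i * i ≤ k ∧ i ∣ k ∧ PySem.List.pyGetD mp k 0 = 0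
  · rw [if_pos ⟨(hmem k).mpr ⟨hc.1, by omega, (hdvd_iff k).mpr hc.2.1⟩, hc.2.2⟩, if_pos hc]
  · rw [if_neg (by
      intro ⟨hm, h0⟩
      rw [hmem] at hm
      exact hc ⟨hm.1, (hdvd_iff k).mp hm.2.2, h0⟩), if_neg hc]

-- pvMF k = the least prime factor of k (as an Int), for 2 ≤ k
def pvMF (k : Int) : Int := (k.toNat.minFac : Int)

theorem pvMF_two_le (k : Int) (h : 2 ≤ k) : 2 ≤ pvMF k := by
  unfold pvMF
  exact_mod_cast (Nat.minFac_prime (show k.toNat ≠ 1 by omega)).two_le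

theorem pvMF_le (k : Int) (h : 2 ≤ k) : pvMF k ≤ k := by
  unfold pvMF
  have := Nat.minFac_le (show 0 < k.toNat by omega)
  omega

theorem pvMF_dvd (k : Int) (h : 2 ≤ k) : pvMF k ∣ k := by
  unfold pvMF
  have hcast : ((k.toNat : Int)) = k := by omega
  rw [← hcast]
  exact_mod_cast Nat.minFac_dvd k.toNat

def pvInv (c i : Int) (mp : List Int) : Prop :=
  (mp.length : Int) = c + 1 ∧
    ∀ k, 2 ≤ k → k ≤ c →
      PySem.List.pyGetD mp k 0 = if pvMF k ≤ i then pvMF k else 0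

theorem pvSieveStep (c i : Int) (h2 : 2 ≤ i) (hic : i ≤ c) (mp : List Int)
    (hinv : pvInv c (i - 1) mp) :
    pvInv c i
      (if PySem.List.pyGetD mp i 0 = 0 then pvSieveInner c i (PySem.List.pySetD mp i i)
       else mp) := by
  obtain ⟨hlen, hval⟩ := hinv
  by_cases hz : PySem.List.pyGetD mp i 0 = 0
  · rw [if_pos hz]
    -- the slot for i is still 0, so i has no prime factor < i: i is prime and pvMF i = i
    have hni : ¬ pvMF i ≤ i - 1 := by
      intro hle
      rw [hval i h2 hic, if_pos hle] at hz
      have := pvMF_two_le i h2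
      omega
    have hmfi : pvMF i = i := by
      have := pvMF_le i h2
      omega
    have hiprime : i.toNat.Prime := by
      rw [Nat.prime_def_minFac]
      constructor
      · omega
      · unfold pvMF at hmfi; omega
    set mp1 := PySem.List.pySetD mp i i with hmp1
    have hlen1 : (mp1.length : Int) = c + 1 := by
      rw [hmp1, PySem.List.length_pySetD]; exact hlen
    have hget1 : ∀ k : Int, 0 ≤ k → k ≤ c →
        PySem.List.pyGetD mp1 k 0 = if k = i then i else PySem.List.pyGetD mp k 0 := by
      intro k hk0 hkc
      rw [hmp1, PySem.List.pySetD_of_nonneg mp i (by omega),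
        PySem.List.pyGetD_of_nonneg _ _ hk0, PySem.List.pyGetD_of_nonneg _ _ hk0, pvGetD_set]
      have hmplen : k.toNat < mp.length := by
        have h' : (k.toNat : Int) < (mp.length : Int) := by rw [hlen]; omega
        exact_mod_cast h'
      by_cases hki : k = i
      · subst hki
        rw [if_pos ⟨rfl, hmplen⟩, if_pos rfl]
      · rw [if_neg (by intro ⟨hh, _⟩; exact hki (by omega)), if_neg hki]
    constructor
    · rw [pvSieveInner_len]; exact hlen1
    · intro k hk2 hkc
      rw [pvSieveInner_getD c i h2 mp1 hlen1 k (by omega) hkc, hget1 k (by omega) hkc]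
      by_cases hki : k = i
      · subst hki
        rw [if_neg (by intro ⟨_, _, hzz⟩; rw [if_pos rfl] at hzz; omega), if_pos rfl,
          if_pos (by omega)]
        exact hmfi.symm
      · rw [if_neg hki]
        have hvk := hval k hk2 hkc
        rw [hvk]
        by_cases hsm : pvMF k ≤ i - 1
        · -- already written, stays
          have h2k := pvMF_two_le k hk2
          rw [if_pos hsm, if_neg (by intro ⟨_, _, hzz⟩; omega), if_pos (by omega)]
        · -- slot still 0
          rw [if_neg hsm]
          by_cases hdk : i ∣ k
          · -- k is a proper multiple of i: pvMF k = i and i*i ≤ k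
            have hik : i < k := by
              have hle := Int.le_of_dvd (by omega) hdk
              omega
            have hdkN : i.toNat ∣ k.toNat := by
              have hcast : ((k.toNat : Int)) = k := by omega
              have hicast : ((i.toNat : Int)) = i := by omega
              have h' := hdk; rw [← hcast, ← hicast] at h'; exact_mod_cast h'
            have hmfk : pvMF k = i := by
              have hle : k.toNat.minFac ≤ i.toNat := Nat.minFac_le_of_dvd (by omega) hdkN
              unfold pvMF at *
              omega
            obtain ⟨m, hm⟩ := hdkN
            have hm2 : 2 ≤ m := by
              rcases Nat.lt_or_ge m 2 with hlt | hge
              · have hq : m = 0 ∨ m = 1 := by omega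
                rcases hq with hq | hq <;> rw [hq] at hm <;> omega
              · exact hge
            have hmdvd : m ∣ k.toNat := ⟨i.toNat, by rw [hm]; ring⟩
            have hmge : k.toNat.minFac ≤ m := Nat.minFac_le_of_dvd hm2 hmdvd
            have hsq : i * i ≤ k := by
              have h2' : i.toNat ≤ m := by
                unfold pvMF at hmfk
                omega
              have hs : i.toNat * i.toNat ≤ k.toNat := by
                rw [hm]
                exact Nat.mul_le_mul_left _ h2'
              have hcast : ((i.toNat * i.toNat : Nat) : Int) ≤ ((k.toNat : Nat) : Int) := by
                exact_mod_cast hs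
              push_cast at hcast
              have hii : ((i.toNat : Int)) = i := by omega
              rw [hii] at hcast
              omega
            rw [if_pos ⟨hsq, hdk, rfl⟩, if_pos (le_of_eq hmfk), hmfk]
          · -- i does not divide k: pvMF k > i, slot stays 0
            have hmfk : ¬ pvMF k ≤ i := by
              intro hle
              have heq : pvMF k = i := by omega
              exact hdk (heq ▸ pvMF_dvd k hk2)
            rw [if_neg (by intro ⟨_, hdd, _⟩; exact hdk hdd), if_neg hmfk]
  · rw [if_neg hz]
    -- slot for i already written: pvMF i ≤ i - 1, so i is not prime and no k has pvMF k = i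
    have hsi : pvMF i ≤ i - 1 := by
      by_contra hn
      rw [hval i h2 hic, if_neg hn] at hz
      exact hz rfl
    refine ⟨hlen, fun k hk2 hkc => ?_⟩
    rw [hval k hk2 hkc]
    by_cases hc1 : pvMF k ≤ i - 1
    · rw [if_pos hc1, if_pos (by omega)]
    · rw [if_neg hc1, if_neg (by
        intro hle
        have hmfk : pvMF k = i := by omega
        -- pvMF k is prime, but pvMF i < i means i is not prime
        have hkprime : (pvMF k).toNat.Prime := by
          unfold pvMF
          simpa using Nat.minFac_prime (show k.toNat ≠ 1 by omega)
        rw [hmfk] at hkprime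
        have : i.toNat.minFac = i.toNat := hkprime.minFac_eq
        unfold pvMF at hsi
        omega)]

theorem pvMinPrime_inv (c : Int) (hc : 1 ≤ c) : ∀ i : Int, 1 ≤ i → i ≤ c →
    pvInv c i
      ((PySem.List.pyRange 2 (i + 1) 1).foldl
        (fun mp i =>
          if PySem.List.pyGetD mp i 0 = 0 then pvSieveInner c i (PySem.List.pySetD mp i i)
          else mp)
        (List.replicate (c + 1).toNat 0)) := by
  intro i hi
  induction i, hi using Int.le_induction with
  | base =>
    intro _
    rw [PySem.List.pyRange_one_eq_nil (by omega)]
    simp only [List.foldl_nil]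
    constructor
    · simp; omega
    · intro k hk2 hkc
      have hmf := pvMF_two_le k hk2
      rw [if_neg (by omega), PySem.List.pyGetD_of_nonneg _ _ (by omega : (0:Int) ≤ k)]
      rcases Nat.lt_or_ge k.toNat (c+1).toNat with hlt | hge
      · simp [List.getD, List.getElem?_replicate, hlt]
      · simp [List.getD, List.getElem?_eq_none (show (List.replicate (c+1).toNat (0:Int)).length ≤ k.toNat by simp; omega)]
  | succ i hi ih =>
    intro hic
    rw [PySem.List.pyRange_one_succ_right (by omega), List.foldl_append, List.foldl_cons,
      List.foldl_nil]
    have hstep := pvSieveStep c (i + 1) (by omega) hic _ (by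
      have h' := ih (by omega)
      simpa using h')
    simpa using hstep

theorem pvMinPrime_correct (c k : Int) (h2 : 2 ≤ k) (hkc : k ≤ c) :
    PySem.List.pyGetD (pvMinPrime c) k 0 = pvMF k := by
  have h := pvMinPrime_inv c (by omega) c (by omega) le_rfl
  unfold pvMinPrime
  rw [h.2 k h2 hkc, if_pos (le_trans (pvMF_le k h2) hkc)]

-- A's while-loop over one number is the fold of pvAStep over its distinct prime factors
theorem pvALoop_eq (c : Int) (mp : List Int)
    (hmp : ∀ k, 2 ≤ k → k ≤ c → PySem.List.pyGetD mp k 0 = pvMF k) :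
    ∀ (fuel : Nat) (num : Int), num ≤ c → num.toNat < fuel →
      ∀ (i : Int) (st : PySem.Dict Int Int × List (Option Int)),
        pvALoop fuel mp i num st = (pvPrimesI num).foldl (fun st p => pvAStep i p st) st := by
  intro fuel
  induction fuel with
  | zero => omega
  | succ fuel ih =>
    intro num hc hf i st
    rw [pvALoop]
    by_cases h1 : 1 < num
    · rw [if_pos h1, hmp num (by omega) hc]
      have hmf2 : 2 ≤ pvMF num := pvMF_two_le num (by omega)
      rw [pvDivOut_eq _ _ _ hmf2 (by omega) (by omega)]
      have hmfn : (pvMF num).toNat = num.toNat.minFac := by unfold pvMF; omega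
      rw [hmfn]
      set num' : Int := ((pvStrip num.toNat num.toNat.minFac : Nat) : Int) with hnum'
      have hstriplt : pvStrip num.toNat num.toNat.minFac < num.toNat :=
        pvStrip_lt _ _ (by
          have := (Nat.minFac_prime (show num.toNat ≠ 1 by omega)).two_le
          omega) (by omega) (Nat.minFac_dvd _)
      have hrec := ih num' (by
          have := pvStrip_le num.toNat num.toNat.minFac
          omega) (by
          simp only [hnum', Int.toNat_natCast]
          omega) i (pvAStep i (pvMF num) st)
      rw [hrec]
      have hunf : pvPrimesI num = pvMF num :: pvPrimesI num' := by
        unfold pvPrimesI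
        rw [pvPrimesN_of_ge num.toNat (by omega), List.map_cons]
        simp only [hnum', Int.toNat_natCast]
        rfl
      rw [hunf, List.foldl_cons]
    · rw [if_neg h1, pvPrimesI_of_le_one num (by omega), List.foldl_nil]

-- cast bookkeeping for reads/writes at i and i+1
theorem pvRead_i (dp : List (Option Int)) (i : Nat) :
    PySem.List.pyGetD dp (i : Int) none = dp.getD i none := PySem.List.pyGetD_natCast dp i none

theorem pvRead_i1 (dp : List (Option Int)) (i : Nat) :
    PySem.List.pyGetD dp ((i : Int) + 1) none = dp.getD (i + 1) none := by
  rw [show ((i : Int) + 1) = ((i + 1 : Nat) : Int) by push_cast; ring]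
  exact PySem.List.pyGetD_natCast dp (i+1) none

theorem pvWrite_i1 (dp : List (Option Int)) (i : Nat) (v : Option Int) :
    PySem.List.pySetD dp ((i : Int) + 1) v = dp.set (i + 1) v := by
  rw [show ((i : Int) + 1) = ((i + 1 : Nat) : Int) by push_cast; ring]
  exact PySem.List.pySetD_natCast dp (i+1) v

-- A's two dp[i+1] updates for one prime collapse to a single conditional write of pvAdd1 v
theorem pvDpUpdate (i n : Nat) (hi : i < n) (dp : List (Option Int)) (hlen : dp.length = n + 1)
    (v : Option Int)
    (hnoop : pvOptLt (pvAdd1 (dp.getD i none)) (pvOMin (dp.getD (i+1) none) (pvAdd1 v)) = false) :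
    (if pvOptLt (pvAdd1 (PySem.List.pyGetD
          (if pvOptLt (pvAdd1 v) (PySem.List.pyGetD dp ((i:Int) + 1) none) then
            PySem.List.pySetD dp ((i:Int) + 1) (pvAdd1 v) else dp) (i:Int) none))
        (PySem.List.pyGetD (if pvOptLt (pvAdd1 v) (PySem.List.pyGetD dp ((i:Int)+1) none) then
            PySem.List.pySetD dp ((i:Int) + 1) (pvAdd1 v) else dp) ((i:Int) + 1) none) then
      PySem.List.pySetD (if pvOptLt (pvAdd1 v) (PySem.List.pyGetD dp ((i:Int)+1) none) then
            PySem.List.pySetD dp ((i:Int) + 1) (pvAdd1 v) else dp) ((i:Int) + 1)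
        (pvAdd1 (PySem.List.pyGetD (if pvOptLt (pvAdd1 v) (PySem.List.pyGetD dp ((i:Int)+1) none) then
            PySem.List.pySetD dp ((i:Int) + 1) (pvAdd1 v) else dp) (i:Int) none))
      else (if pvOptLt (pvAdd1 v) (PySem.List.pyGetD dp ((i:Int)+1) none) then
            PySem.List.pySetD dp ((i:Int) + 1) (pvAdd1 v) else dp))
    = if pvOptLt (pvAdd1 v) (dp.getD (i+1) none) then dp.set (i+1) (pvAdd1 v) else dp := by
  rw [pvRead_i1 dp i]
  set dp1 := (if pvOptLt (pvAdd1 v) (dp.getD (i+1) none) = true then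
      PySem.List.pySetD dp ((i:Int) + 1) (pvAdd1 v) else dp) with hdp1
  have h1i : PySem.List.pyGetD dp1 (i:Int) none = dp.getD i none := by
    rw [hdp1]
    split_ifs with h
    · rw [pvWrite_i1, pvRead_i, pvGetD_set, if_neg (by omega)]
    · rw [pvRead_i]
  have h1i1 : PySem.List.pyGetD dp1 ((i:Int)+1) none =
      pvOMin (dp.getD (i+1) none) (pvAdd1 v) := by
    rw [pvOMin_eq_ite, hdp1]
    split_ifs with h
    · rw [pvWrite_i1, pvRead_i1, pvGetD_set, if_pos ⟨rfl, by omega⟩]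
    · rw [pvRead_i1]
  rw [h1i, h1i1, if_neg (by simpa [List.getD] using hnoop), hdp1]
  split_ifs with h
  · rw [pvWrite_i1]
  · rfl

-- one step of A (for one prime p) against one step of B, under the simulation invariant
theorem pvStepSim (i n : Nat) (hi : i < n)
    (ind : PySem.Dict Int Int) (dp : List (Option Int)) (best : PySem.Dict Int (Option Int))
    (cur : Option Int) (p : Int)
    (hlen : dp.length = n + 1)
    (hkeys : ∀ q, ind.contains q = best.contains q)
    (hvals : ∀ q, ind.contains q = true →
      ∃ j : Nat, ind.getD q 0 = (j : Int) ∧ j ≤ i ∧ best.getD q none = dp.getD j none)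
    (hcur : cur = dp.getD (i + 1) none) :
    (pvAStep (i:Int) p (ind, dp)).2.length = n + 1 ∧
    (∀ k : Nat, k ≠ i + 1 → (pvAStep (i:Int) p (ind, dp)).2.getD k none = dp.getD k none) ∧
    (∀ q, (pvAStep (i:Int) p (ind, dp)).1.contains q =
      (pvBStep (dp.getD i none) (cur, best) p).2.contains q) ∧
    (∀ q, (pvAStep (i:Int) p (ind, dp)).1.contains q = true →
      ∃ j : Nat, (pvAStep (i:Int) p (ind, dp)).1.getD q 0 = (j:Int) ∧ j ≤ i ∧
        (pvBStep (dp.getD i none) (cur, best) p).2.getD q none =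
          (pvAStep (i:Int) p (ind, dp)).2.getD j none) ∧
    (pvBStep (dp.getD i none) (cur, best) p).1 =
      (pvAStep (i:Int) p (ind, dp)).2.getD (i + 1) none := by
  have hprev : (dp.getD i none) = dp.getD i none := rfl
  set bp := best.getD p none with hbpdef
  set b := pvOMin bp (dp.getD i none) with hbdef
  have hnoop : pvOptLt (pvAdd1 (dp.getD i none)) (pvOMin (dp.getD (i+1) none) (pvAdd1 b)) = false := by
    have hno := pvNoop3 (dp.getD (i+1) none) bp (dp.getD i none)
    rw [← hbdef] at hno
    exact hno
  -- the index j' that A keeps for p after the step, and the pair pvAStep produces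
  have hmain : ∃ j' : Nat, j' ≤ i ∧ dp.getD j' none = b ∧
      pvAStep (i:Int) p (ind, dp) =
        ((if ind.contains p = false ∨
            pvOptLt (PySem.List.pyGetD dp (i:Int) none)
              (PySem.List.pyGetD dp (ind.getD p 0) none) then ind.insert p (i:Int) else ind),
         (if pvOptLt (pvAdd1 b) (dp.getD (i+1) none) then dp.set (i+1) (pvAdd1 b) else dp)) ∧
      (if ind.contains p = false ∨
          pvOptLt (PySem.List.pyGetD dp (i:Int) none)
            (PySem.List.pyGetD dp (ind.getD p 0) none) then ind.insert p (i:Int) else ind).getD p 0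
        = (j' : Int) := by
    by_cases hc : ind.contains p = true
    · obtain ⟨j, hj, hjle, hbv⟩ := hvals p hc
      have hbpj : bp = dp.getD j none := by rw [hbpdef, hbv]
      have hreadj : PySem.List.pyGetD dp (ind.getD p 0) none = bp := by
        rw [hj, PySem.List.pyGetD_natCast, hbpj]
      by_cases hlt : pvOptLt (dp.getD i none) bp = true
      · have hbprev : b = dp.getD i none := by rw [hbdef, pvOMin_eq_ite, if_pos hlt]
        have hcond : ind.contains p = false ∨
            pvOptLt (PySem.List.pyGetD dp (i:Int) none)
              (PySem.List.pyGetD dp (ind.getD p 0) none) := by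
          right
          rw [hreadj, pvRead_i]
          exact hlt
        refine ⟨i, le_rfl, hbprev.symm, ?_, by rw [if_pos hcond, PySem.Dict.getD_insert_self]⟩
        show pvAStep (i:Int) p (ind, dp) = _
        rw [pvAStep]
        dsimp only
        rw [if_pos hcond, PySem.Dict.getD_insert_self, pvRead_i dp i, ← hbprev]
        exact congrArg _ (pvDpUpdate i n hi dp hlen b hnoop)
      · have hbb : b = bp := by rw [hbdef, pvOMin_eq_ite, if_neg hlt]
        have hcond : ¬ (ind.contains p = false ∨
            pvOptLt (PySem.List.pyGetD dp (i:Int) none)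
              (PySem.List.pyGetD dp (ind.getD p 0) none)) := by
          rintro (h | h)
          · rw [hc] at h; exact Bool.noConfusion h
          · rw [hreadj, pvRead_i] at h; exact hlt h
        refine ⟨j, hjle, by rw [← hbpj, hbb], ?_, by rw [if_neg hcond]; exact hj⟩
        show pvAStep (i:Int) p (ind, dp) = _
        rw [pvAStep]
        dsimp only
        rw [if_neg hcond, hj, PySem.List.pyGetD_natCast dp j none, ← hbpj, ← hbb]
        exact congrArg _ (pvDpUpdate i n hi dp hlen b hnoop)
    · have hcf : ind.contains p = false := by simpa using hc
      have hbf : best.contains p = false := by rw [← hkeys p]; exact hcf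
      have hbpnone : bp = none := by rw [hbpdef, PySem.Dict.getD_of_not_contains best none hbf]
      have hbprev : b = dp.getD i none := by rw [hbdef, hbpnone]; rfl
      refine ⟨i, le_rfl, hbprev.symm, ?_, by rw [if_pos (Or.inl hcf), PySem.Dict.getD_insert_self]⟩
      show pvAStep (i:Int) p (ind, dp) = _
      rw [pvAStep]
      dsimp only
      rw [if_pos (Or.inl hcf), PySem.Dict.getD_insert_self, pvRead_i dp i, ← hbprev]
      exact congrArg _ (pvDpUpdate i n hi dp hlen b hnoop)
  obtain ⟨j', hj'le, hdpj', hA, hindv⟩ := hmain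
  have hBv : pvBStep (dp.getD i none) (cur, best) p =
      (pvOMin cur (pvAdd1 b), best.insert p b) := rfl
  rw [hA, hBv]
  set indN := (if ind.contains p = false ∨
      pvOptLt (PySem.List.pyGetD dp (i:Int) none)
        (PySem.List.pyGetD dp (ind.getD p 0) none) then ind.insert p (i:Int) else ind) with hindN
  set dpN := (if pvOptLt (pvAdd1 b) (dp.getD (i+1) none) then dp.set (i+1) (pvAdd1 b) else dp)
    with hdpN
  have hlenN : dpN.length = n + 1 := by
    rw [hdpN]; split_ifs <;> simp [hlen]
  have hpresN : ∀ k : Nat, k ≠ i + 1 → dpN.getD k none = dp.getD k none := by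
    intro k hk
    rw [hdpN]
    split_ifs with h
    · rw [pvGetD_set, if_neg (by tauto)]
    · rfl
  have hcurN : dpN.getD (i+1) none = pvOMin (dp.getD (i+1) none) (pvAdd1 b) := by
    rw [hdpN, pvOMin_eq_ite]
    split_ifs with h
    · rw [pvGetD_set, if_pos ⟨rfl, by omega⟩]
    · rfl
  have hcontN : ∀ q, indN.contains q = (best.insert p b).contains q := by
    intro q
    rw [hindN, PySem.Dict.contains_insert]
    split_ifs with h
    · rw [PySem.Dict.contains_insert, hkeys q]
    · by_cases hqp : q = p
      · subst hqp
        have hct : ind.contains q = true := by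
          by_contra hff
          exact h (Or.inl (by simpa using hff))
        have hbt : best.contains q = true := by rw [← hkeys q]; exact hct
        simp [hct, hbt]
      · have hne : (q == p) = false := by simpa using hqp
        rw [hne, Bool.false_or, hkeys q]
  refine ⟨hlenN, hpresN, hcontN, ?_, by rw [hcurN, hcur]⟩
  intro q hq
  by_cases hqp : q = p
  · subst hqp
    refine ⟨j', hindv, hj'le, ?_⟩
    rw [PySem.Dict.getD_insert_self, hpresN j' (by omega), hdpj']
  · have hqind : ind.contains q = true := by
      rw [hindN] at hq
      by_cases h : ind.contains p = false ∨
          pvOptLt (PySem.List.pyGetD dp (i:Int) none)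
            (PySem.List.pyGetD dp (ind.getD p 0) none)
      · rw [if_pos h, PySem.Dict.contains_insert] at hq
        simpa [hqp] using hq
      · rwa [if_neg h] at hq
    obtain ⟨j, hj, hjle, hbv⟩ := hvals q hqind
    refine ⟨j, ?_, hjle, ?_⟩
    · rw [hindN]
      split_ifs with h
      · rw [PySem.Dict.getD_insert_of_ne _ _ _ (by simpa using hqp)]
        exact hj
      · exact hj
    · rw [PySem.Dict.getD_insert_of_ne _ _ _ (by simpa using hqp),
        hpresN j (by omega), hbv]

-- the whole inner loop (all primes of one number) stays in lockstep
theorem pvInnerSim (i n : Nat) (hi : i < n) (l : List Int) :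
    ∀ (ind : PySem.Dict Int Int) (dp : List (Option Int))
      (best : PySem.Dict Int (Option Int)) (cur : Option Int),
      dp.length = n + 1 →
      (∀ q, ind.contains q = best.contains q) →
      (∀ q, ind.contains q = true →
        ∃ j : Nat, ind.getD q 0 = (j : Int) ∧ j ≤ i ∧ best.getD q none = dp.getD j none) →
      cur = dp.getD (i + 1) none →
      (l.foldl (fun st p => pvAStep (i : Int) p st) (ind, dp)).2.length = n + 1 ∧
      (∀ k : Nat, k ≠ i + 1 →
        (l.foldl (fun st p => pvAStep (i : Int) p st) (ind, dp)).2.getD k none =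
          dp.getD k none) ∧
      (∀ q, (l.foldl (fun st p => pvAStep (i : Int) p st) (ind, dp)).1.contains q =
        (l.foldl (pvBStep (dp.getD i none)) (cur, best)).2.contains q) ∧
      (∀ q, (l.foldl (fun st p => pvAStep (i : Int) p st) (ind, dp)).1.contains q = true →
        ∃ j : Nat,
          (l.foldl (fun st p => pvAStep (i : Int) p st) (ind, dp)).1.getD q 0 = (j : Int) ∧
          j ≤ i ∧
          (l.foldl (pvBStep (dp.getD i none)) (cur, best)).2.getD q none =
            (l.foldl (fun st p => pvAStep (i : Int) p st) (ind, dp)).2.getD j none) ∧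
      (l.foldl (pvBStep (dp.getD i none)) (cur, best)).1 =
        (l.foldl (fun st p => pvAStep (i : Int) p st) (ind, dp)).2.getD (i + 1) none := by
  induction l with
  | nil =>
    intro ind dp best cur hlen hkeys hvals hcur
    exact ⟨hlen, fun _ _ => rfl, hkeys, hvals, hcur⟩
  | cons p t ih =>
    intro ind dp best cur hlen hkeys hvals hcur
    obtain ⟨hlen1, hpres1, hkeys1, hvals1, hcur1⟩ :=
      pvStepSim i n hi ind dp best cur p hlen hkeys hvals hcur
    simp only [List.foldl_cons]
    set stA := pvAStep (i:Int) p (ind, dp) with hstA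
    set stB := pvBStep (dp.getD i none) (cur, best) p with hstB
    have hprev1 : stA.2.getD i none = dp.getD i none := hpres1 i (by omega)
    obtain ⟨hlen2, hpres2, hkeys2, hvals2, hcur2⟩ :=
      ih stA.1 stA.2 stB.2 stB.1 hlen1 hkeys1 hvals1 hcur1
    rw [hprev1] at hkeys2 hvals2 hcur2
    refine ⟨hlen2, ?_, hkeys2, ?_, hcur2⟩
    · intro k hk
      rw [hpres2 k hk, hpres1 k hk]
    · intro q hq
      obtain ⟨j, hj, hjle, hval⟩ := hvals2 q hq
      exact ⟨j, hj, hjle, hval⟩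

-- the outer loop over the numbers: B's running value tracks A's dp tail entry
theorem pvOuterSim (c : Int) (mp : List Int)
    (hmp : ∀ k, 2 ≤ k → k ≤ c → PySem.List.pyGetD mp k 0 = pvMF k) :
    ∀ (rest : List Int) (i n : Nat), i + rest.length = n →
      (∀ x ∈ rest, x ≤ c) →
      ∀ (ind : PySem.Dict Int Int) (dp : List (Option Int))
        (best : PySem.Dict Int (Option Int)) (prev : Option Int),
        dp.length = n + 1 →
        prev = dp.getD i none →
        (∀ k : Nat, i < k → dp.getD k none = none) →
        (∀ q, ind.contains q = best.contains q) →
        (∀ q, ind.contains q = true →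
          ∃ j : Nat, ind.getD q 0 = (j : Int) ∧ j ≤ i ∧ best.getD q none = dp.getD j none) →
        ((PySem.List.enumerate rest (i : Int)).foldl
            (fun st pair => pvALoop (pair.2.toNat + 1) mp pair.1 pair.2 st) (ind, dp)).2.length
          = n + 1 ∧
        (rest.foldl
            (fun st num => (pvDistinctPrimeFactors num).foldl (pvBStep st.1) (none, st.2))
            (prev, best)).1 =
          ((PySem.List.enumerate rest (i : Int)).foldl
            (fun st pair => pvALoop (pair.2.toNat + 1) mp pair.1 pair.2 st) (ind, dp)).2.getD n none := by
  intro rest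
  induction rest with
  | nil =>
    intro i n hn hrc ind dp best prev hlen hprev hhigh hkeys hvals
    have : i = n := by simpa using hn
    subst this
    exact ⟨hlen, by simpa [PySem.List.enumerate] using hprev⟩
  | cons num rest ih =>
    intro i n hn hrc ind dp best prev hlen hprev hhigh hkeys hvals
    have hi : i < n := by simp at hn; omega
    rw [PySem.List.enumerate_cons, List.foldl_cons, List.foldl_cons]
    -- A's first element
    rw [pvALoop_eq c mp hmp (num.toNat + 1) num (hrc num (by simp)) (by omega) (i : Int) (ind, dp)]
    -- B's first element
    rw [pvDPF_eq num]
    have hcur0 : (none : Option Int) = dp.getD (i + 1) none := (hhigh (i+1) (by omega)).symm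
    obtain ⟨hlen1, hpres1, hkeys1, hvals1, hcur1⟩ :=
      pvInnerSim i n hi (pvPrimesI num) ind dp best none hlen hkeys hvals hcur0
    set stA := (pvPrimesI num).foldl (fun st p => pvAStep (i:Int) p st) (ind, dp) with hstA
    set stB := (pvPrimesI num).foldl (pvBStep (dp.getD i none)) (none, best) with hstB
    have hstep := ih (i+1) n (by simp at hn ⊢; omega) (fun x hx => hrc x (by simp [hx]))
      stA.1 stA.2 stB.2 stB.1 hlen1 hcur1
      (fun k hk => by rw [hpres1 k (by omega)]; exact hhigh k (by omega))
      hkeys1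
      (fun q hq => by
        obtain ⟨j, hj, hjle, hv⟩ := hvals1 q hq
        exact ⟨j, hj, by omega, hv⟩)
    rw [show ((i : Int) + 1) = ((i + 1 : Nat) : Int) by push_cast; ring]
    rw [← hprev] at hstB
    rw [hstB] at hstep
    exact hstep

-- ===== VERDICT (by name: the statement is the Claim_ definition above) =====
-- final assembly: instantiate the outer simulation at the initial states of both ports
theorem lc_2464_eq_alt (nums : List Int) (hpre : nums ≠ []) : lc_2464 nums = lc_2464_alt nums := by
  set n := nums.length with hn
  set c := (PySem.List.max? nums (fun x => x)).getD 0 with hc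
  have hmax : ∀ x ∈ nums, x ≤ c := by
    intro x hx
    rcases hm : PySem.List.max? nums (fun y => y) with _ | m
    · cases nums with
      | nil => exact absurd rfl hpre
      | cons a t => rw [PySem.List.max?_id_cons] at hm; exact absurd hm (by simp)
    · have := PySem.List.max?_isMax hm x hx
      rw [hc, hm]
      exact this
  set dp0 : List (Option Int) :=
    PySem.List.pySetD (List.replicate (n + 1) (none : Option Int)) 0 (some 0) with hdp0
  have hdp0' : dp0 = (List.replicate (n + 1) (none : Option Int)).set 0 (some 0) := by
    rw [hdp0, PySem.List.pySetD_of_nonneg _ _ (by omega)]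
    rfl
  have hlen0 : dp0.length = n + 1 := by rw [hdp0']; simp
  have hget00 : dp0.getD 0 none = some 0 := by
    rw [hdp0', pvGetD_set, if_pos ⟨rfl, by simp⟩]
  have hhigh0 : ∀ k : Nat, 0 < k → dp0.getD k none = none := by
    intro k hk
    rw [hdp0', pvGetD_set, if_neg (by omega)]
    rcases Nat.lt_or_ge k (n+1) with hlt | hge
    · simp [List.getD, List.getElem?_replicate, hlt]
    · simp [List.getD, List.getElem?_eq_none (show (List.replicate (n+1) (none : Option Int)).length ≤ k by simpa using hge)]
  have hkeys0 : ∀ q : Int, (PySem.Dict.empty : PySem.Dict Int Int).contains q =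
      (PySem.Dict.empty : PySem.Dict Int (Option Int)).contains q := by
    intro q
    rw [PySem.Dict.contains_empty, PySem.Dict.contains_empty]
  have hvals0 : ∀ q : Int, (PySem.Dict.empty : PySem.Dict Int Int).contains q = true →
      ∃ j : Nat, (PySem.Dict.empty : PySem.Dict Int Int).getD q 0 = (j : Int) ∧ j ≤ 0 ∧
        (PySem.Dict.empty : PySem.Dict Int (Option Int)).getD q none = dp0.getD j none := by
    intro q hq
    rw [PySem.Dict.contains_empty] at hq
    exact Bool.noConfusion hq
  have key := pvOuterSim c (pvMinPrime c)
    (fun k h2 hkc => pvMinPrime_correct c k h2 hkc) nums 0 n (by simp [hn]) hmax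
    PySem.Dict.empty dp0 PySem.Dict.empty (some 0) hlen0 hget00.symm hhigh0 hkeys0 hvals0
  rw [show (((0 : Nat) : Int)) = (0 : Int) by norm_num] at key
  obtain ⟨hlenA, hvalAB⟩ := key
  -- name the two final fold states
  set resA := (PySem.List.enumerate nums 0).foldl
      (fun st pair => pvALoop (pair.2.toNat + 1) (pvMinPrime c) pair.1 pair.2 st)
      ((PySem.Dict.empty : PySem.Dict Int Int), dp0) with hresA
  set resB := nums.foldl
      (fun (st : Option Int × PySem.Dict Int (Option Int)) num =>
        (pvDistinctPrimeFactors num).foldl (pvBStep st.1) (none, st.2))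
      (some 0, (PySem.Dict.empty : PySem.Dict Int (Option Int))) with hresB
  -- A's dp[-1] is its last cell, which is cell n
  have hne : resA.2 ≠ [] := by
    intro h
    rw [h] at hlenA
    simp at hlenA
  have hlast : PySem.List.pyGetD resA.2 (-1) none = resA.2.getD n none := by
    rw [PySem.List.pyGetD_neg_one resA.2 none hne, List.getLast_eq_getElem,
      List.getD, List.getElem?_eq_getElem (by omega : n < resA.2.length), Option.getD_some]
    simp only [show resA.2.length - 1 = n from by omega]
  show (match PySem.List.pyGetD resA.2 (-1) none with
        | some v => v
        | none => -1) =
      (match resB.1 with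
        | some v => v
        | none => -1)
  rw [hlast, ← hvalAB]

theorem lc_2464_spec : Claim_equal_lc_2464 := by
  unfold Claim_equal_lc_2464
  intro nums _ hpre
  unfold Spec_lc_2464
  exact lc_2464_eq_alt nums hpre
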